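-- pv_equiv track=rewrite | github.com/lijiayan2020/Code | CompetitionCode/LanQiaoBei/LianXi/JiChu_Sheet/ji_chu_2_23.py | an
-- ===== SOURCE A (Python) =====
-- def an(n, sign=1):
--     s = ''
--     sin = "sin"
--     for i in range(1, n+1):
--         symbol = "+" if sign==1 else "-"
--         s = s + symbol + sin + "(" + str(i)
--         sign *= -1
--     s += ")"*n
--     return s[1:]
-- ===== SOURCE B (Python) =====
-- def an(n, sign=1):
--     expr = ''
--     for i in range(n, 0, -1):
--         inner = (('+' if sign * (-1) ** i == 1 else '-') + expr) if i < n else ''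
--         expr = 'sin(' + str(i) + inner + ')'
--     return expr
-- ===== Notes on version B (the rewrite author's own statement) =====
-- stated objective: alternative
-- what changed: Replaces A's left-to-right accumulator loop (which appends a leading operator per term, tacks all n closing parens on afterwards and trims the spurious first operator with s[1:]) by an inside-out construction: iterate i from n down to 1 wrapping the inner expression as sin(i...), so no paren block and no trim are needed.
import Mathlib
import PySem

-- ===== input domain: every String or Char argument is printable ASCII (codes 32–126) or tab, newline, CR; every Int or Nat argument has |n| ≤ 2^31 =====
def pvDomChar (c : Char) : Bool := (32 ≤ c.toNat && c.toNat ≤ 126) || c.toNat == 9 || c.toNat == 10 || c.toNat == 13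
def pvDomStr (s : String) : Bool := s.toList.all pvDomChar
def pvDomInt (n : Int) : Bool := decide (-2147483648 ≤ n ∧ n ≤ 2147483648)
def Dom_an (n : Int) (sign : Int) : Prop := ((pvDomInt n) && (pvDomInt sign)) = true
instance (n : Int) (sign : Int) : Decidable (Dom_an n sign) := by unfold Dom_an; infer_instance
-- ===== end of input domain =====

-- B replaces A's left-to-right accumulator loop (trailing paren block + s[1:] trim) by an
-- inside-out loop wrapping the inner expression; objective: alternative decomposition.

-- ===== PORT A =====
-- the loop body of A, over List Char (state = (s, sign))
def anStep (st : List Char × Int) (i : Int) : List Char × Int :=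
  let symbol := if st.2 == 1 then ['+'] else ['-']
  (st.1 ++ symbol ++ "sin".toList ++ ['('] ++ PySem.Int.toChars i, st.2 * -1)

def an (n : Int) (sign : Int) : String :=
  -- s built by the for-loop, then s += ")"*n (negative n repeats 0 times, as in Python), then return s[1:]
  String.ofList (PySem.List.slice
    (((PySem.List.pyRange 1 (n + 1) 1).foldl anStep ([], sign)).1 ++ List.replicate n.toNat ')')
    (some 1) none)

-- ===== PORT B =====
-- B's loop body: expr wrapped as sin(i ...); i ≥ 1 inside the loop, so (-1)**i is (-1)^i.toNat
def anAltStep (n : Int) (sign : Int) (expr : List Char) (i : Int) : List Char :=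
  let inner := if i < n then (if sign * (-1 : Int) ^ i.toNat == 1 then ['+'] else ['-']) ++ expr else []
  "sin(".toList ++ PySem.Int.toChars i ++ inner ++ [')']

def an_alt (n : Int) (sign : Int) : String :=
  String.ofList ((PySem.List.pyRange n 0 (-1)).foldl (anAltStep n sign) [])

-- ===== PRECONDITION & SPEC =====
def Spec_an (n : Int) (sign : Int) (out : String) : Prop := out = an_alt n sign
instance (n : Int) (sign : Int) (out : String) : Decidable (Spec_an n sign out) := by unfold Spec_an; infer_instance

-- ===== CLAIM (what is proved, stated in full; the proofs are below) =====
def Claim_equal_an : Prop := ∀ (n : Int) (sign : Int), Dom_an n sign → Spec_an n sign (an n sign)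

-- ===== LEMMAS AND PROOFS =====

-- proof-side description of the nested expression from level i with k further levels, current sign sgn
def anRec : Nat → Int → Int → List Char
  | 0, i, _ => "sin(".toList ++ PySem.Int.toChars i ++ [')']
  | k + 1, i, sgn =>
      "sin(".toList ++ PySem.Int.toChars i ++
        (if -sgn == 1 then ['+'] else ['-']) ++ anRec k (i + 1) (-sgn) ++ [')']

-- A's fold over range(a, a+k+2), followed by its k+1 closing parens, spells out
-- the symbol of the current sign and then the nested expression from a.
lemma anFold_eq (k : Nat) : ∀ (a sgn : Int) (acc : List Char),
    ((PySem.List.pyRange a (a + (k : Int) + 1) 1).foldl anStep (acc, sgn)).1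
        ++ List.replicate (k + 1) ')'
      = acc ++ (if sgn == 1 then ['+'] else ['-']) ++ anRec k a sgn := by
  induction k with
  | zero =>
    intro a sgn acc
    have h : a + ((0 : Nat) : Int) + 1 = a + 1 := by push_cast; ring
    rw [h, PySem.List.pyRange_one_singleton]
    simp [anStep, anRec]
  | succ k ih =>
    intro a sgn acc
    have hlt : a < a + (((k + 1 : Nat)) : Int) + 1 := by push_cast; omega
    rw [PySem.List.pyRange_one_cons hlt]
    have harg : a + (((k + 1 : Nat)) : Int) + 1 = (a + 1) + (k : Int) + 1 := by push_cast; ring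
    rw [harg]
    have hrep : List.replicate (k + 1 + 1) ')' = List.replicate (k + 1) ')' ++ [')'] := by
      simp [List.replicate_succ']
    simp only [List.foldl_cons, hrep]
    have hstep : anStep (acc, sgn) a
        = (acc ++ (if sgn == 1 then ['+'] else ['-']) ++ "sin".toList ++ ['(']
            ++ PySem.Int.toChars a, sgn * -1) := by
      simp [anStep]
    rw [hstep, ← List.append_assoc, ih (a + 1) (sgn * -1) _]
    have hsgn : sgn * -1 = -sgn := by ring
    simp [anRec, hsgn]

-- B's countdown fold from level m, started with the inner expression for level m+1,
-- yields the full nested expression from level 1.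
lemma anAltFold_eq (n sign : Int) : ∀ (m : Nat), (m : Int) ≤ n - 1 →
    (PySem.List.pyRange (m : Int) 0 (-1)).foldl (anAltStep n sign)
        (anRec (n - 1 - m).toNat ((m : Int) + 1) (sign * (-1) ^ m))
      = anRec (n - 1).toNat 1 sign := by
  intro m
  induction m with
  | zero => intro _; simp [PySem.List.pyRange_neg_one_eq_nil]
  | succ m ih =>
    intro hm
    have hc : (0 : Int) < ((m + 1 : Nat) : Int) := by push_cast; omega
    rw [PySem.List.pyRange_neg_one_cons hc]
    simp only [List.foldl_cons]
    have hstep : anAltStep n sign (anRec (n - 1 - ((m + 1 : Nat) : Int)).toNat (((m + 1 : Nat) : Int) + 1) (sign * (-1) ^ (m + 1))) ((m + 1 : Nat) : Int)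
        = anRec (n - 1 - (m : Int)).toNat ((m : Int) + 1) (sign * (-1) ^ m) := by
      have hlt : ((m + 1 : Nat) : Int) < n := by push_cast at hm ⊢; omega
      have htoNat : (((m + 1 : Nat) : Int)).toNat = m + 1 := by simp
      have hk : (n - 1 - (m : Int)).toNat = (n - 1 - ((m + 1 : Nat) : Int)).toNat + 1 := by
        push_cast at hm ⊢; omega
      rw [hk]
      simp only [anAltStep, anRec, htoNat, if_pos hlt]
      have hsg : -(sign * (-1 : Int) ^ m) = sign * (-1) ^ (m + 1) := by ring
      have harg : ((m : Int) + 1) + 1 = ((m + 1 : Nat) : Int) + 1 := by push_cast; ring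
      rw [hsg, harg]
      simp
    rw [hstep]
    rw [show ((m + 1 : Nat) : Int) - 1 = (m : Int) by push_cast; ring]
    exact ih (by push_cast at hm ⊢; omega)

theorem an_spec : Claim_equal_an := by
  intro n sign _
  unfold Spec_an an an_alt
  by_cases hn : n < 1
  · have h1 : n + 1 ≤ 1 := by omega
    have h2 : n ≤ 0 := by omega
    rw [PySem.List.pyRange_one_eq_nil h1, PySem.List.pyRange_neg_one_eq_nil h2]
    have h0 : n.toNat = 0 := by omega
    simp only [h0, List.replicate_zero, List.nil_append, List.foldl_nil]
    rfl
  · -- n = m + 1 with m : Nat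
    obtain ⟨m, rfl⟩ : ∃ m : Nat, n = (m : Int) + 1 := ⟨(n - 1).toNat, by omega⟩
    have hA := anFold_eq m 1 sign []
    rw [show (1 : Int) + (m : Int) + 1 = (m : Int) + 1 + 1 by ring] at hA
    rw [show ((m : Int) + 1).toNat = m + 1 by omega, hA]
    -- B side: peel the innermost level m+1, then the countdown lemma
    have hc : (0 : Int) < (m : Int) + 1 := by omega
    rw [PySem.List.pyRange_neg_one_cons hc]
    simp only [List.foldl_cons, show (m : Int) + 1 - 1 = (m : Int) from by ring]
    have hfirst : anAltStep ((m : Int) + 1) sign [] ((m : Int) + 1)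
        = anRec ((m : Int) + 1 - 1 - (m : Int)).toNat ((m : Int) + 1) (sign * (-1) ^ m) := by
      rw [show ((m : Int) + 1 - 1 - (m : Int)).toNat = 0 by omega]
      simp [anAltStep, anRec]
    rw [hfirst, show (m : Int) + 1 - 1 - (m : Int) = (m : Int) - (m : Int) from by ring]
    have hB := anAltFold_eq ((m : Int) + 1) sign m (by omega)
    rw [show (m : Int) + 1 - 1 = (m : Int) from by ring] at hB
    rw [show ((m : Int)).toNat = m by omega] at hB
    rw [hB]
    by_cases hs : sign == 1 <;> simp [hs, PySem.List.slice_from_one]
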